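-- pv_equiv track=rewrite | github.com/BirchJD/RPiTimer | PiTimer_Step-11/UserInterface.py | GetMaskedInput
-- ===== SOURCE A (Python) =====
-- def GetMaskedInput(Mask, Input):
--    InputCount = 0
--    Result = ""
--    for Char in Mask:
--       if Char == "#" and len(Input) > InputCount:
--          Result += Input[InputCount:InputCount + 1]
--          InputCount += 1
--       else:
--          Result += Char
--    return Result
-- ===== SOURCE B (Python) =====
-- def GetMaskedInput(Mask, Input):
--     positions = [i for i, c in enumerate(Mask) if c == "#"]
--     result = list(Mask)
--     for pos, ch in zip(positions, Input):
--         result[pos] = ch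
--     return "".join(result)
-- ===== Notes on version B (the rewrite author's own statement) =====
-- stated objective: alternative
-- what changed: Replaces the single branching scan with an input-counter by an index pass collecting the '#' positions followed by a zip-driven in-place fill of those positions.
import Mathlib
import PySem

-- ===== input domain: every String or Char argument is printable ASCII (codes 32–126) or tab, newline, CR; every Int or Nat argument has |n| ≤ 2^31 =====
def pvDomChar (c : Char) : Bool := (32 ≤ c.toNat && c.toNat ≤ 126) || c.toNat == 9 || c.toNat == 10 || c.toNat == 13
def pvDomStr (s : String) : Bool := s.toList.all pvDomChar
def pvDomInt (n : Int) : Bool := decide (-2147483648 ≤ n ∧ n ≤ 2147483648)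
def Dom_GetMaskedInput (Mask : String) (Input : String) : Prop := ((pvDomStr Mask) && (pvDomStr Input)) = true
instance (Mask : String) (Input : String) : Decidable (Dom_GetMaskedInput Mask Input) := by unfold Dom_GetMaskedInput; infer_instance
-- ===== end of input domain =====

-- B replaces A's branching counter scan by a '#'-position index pass plus a zip-driven fill (alternative decomposition, same result).

-- ===== PORT A =====
-- Loop state: (InputCount, Result); Input[c:c+1] with 0 ≤ c < len is exactly (drop c).take 1.
def GetMaskedInput (Mask : String) (Input : String) : String :=
  let inp := Input.toList
  String.mk ((Mask.toList.foldl
    (fun (st : Nat × List Char) (c : Char) =>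
      if c = '#' ∧ inp.length > st.1 then (st.1 + 1, st.2 ++ (inp.drop st.1).take 1)
      else (st.1, st.2 ++ [c]))
    (0, [])).2)

-- ===== PORT B =====
-- positions = [i for i,c in enumerate(Mask) if c == '#']  (enumerate-and-filter comprehension)
def pvPositions : List Char → Nat → List Nat
  | [], _ => []
  | c :: ms, i => if c = '#' then i :: pvPositions ms (i + 1) else pvPositions ms (i + 1)

def GetMaskedInput_alt (Mask : String) (Input : String) : String :=
  let m := Mask.toList
  let positions := pvPositions m 0
  String.mk (((positions.zip Input.toList).foldl
    (fun (result : List Char) (pc : Nat × Char) => result.set pc.1 pc.2) m))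

-- ===== PRECONDITION & SPEC =====
def Spec_GetMaskedInput (Mask : String) (Input : String) (out : String) : Prop := out = GetMaskedInput_alt Mask Input
instance (Mask : String) (Input : String) (out : String) : Decidable (Spec_GetMaskedInput Mask Input out) := by unfold Spec_GetMaskedInput; infer_instance

-- ===== CLAIM (what is proved, stated in full; the proofs are below) =====
def Claim_equal_GetMaskedInput : Prop := ∀ (Mask : String) (Input : String), Dom_GetMaskedInput Mask Input → Spec_GetMaskedInput Mask Input (GetMaskedInput Mask Input)

-- ===== LEMMAS AND PROOFS =====

-- Reference function: fill '#' slots of the mask from the input, left to right.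
def pvFill : List Char → List Char → List Char
  | [], _ => []
  | c :: ms, inp =>
    if c = '#' then
      match inp with
      | [] => c :: pvFill ms []
      | x :: xs => x :: pvFill ms xs
    else c :: pvFill ms inp

theorem pvFill_nil (m : List Char) : pvFill m [] = m := by
  induction m with
  | nil => rfl
  | cons c ms ih => simp [pvFill, ih]

theorem pvA_foldl (inp : List Char) (ms : List Char) :
    ∀ (k : Nat) (acc : List Char),
      (ms.foldl
        (fun (st : Nat × List Char) (c : Char) =>
          if c = '#' ∧ inp.length > st.1 then (st.1 + 1, st.2 ++ (inp.drop st.1).take 1)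
          else (st.1, st.2 ++ [c]))
        (k, acc)).2 = acc ++ pvFill ms (inp.drop k) := by
  induction ms with
  | nil => intro k acc; simp [pvFill]
  | cons c ms ih =>
    intro k acc
    by_cases hc : c = '#'
    · by_cases hk : inp.length > k
      · have hdrop : inp.drop k = inp[k] :: inp.drop (k + 1) :=
          List.drop_eq_getElem_cons hk
        have htake : (inp.drop k).take 1 = [inp[k]] := by rw [hdrop]; rfl
        subst hc
        rw [List.foldl_cons, if_pos ⟨rfl, hk⟩, ih, hdrop]
        simp [pvFill, htake]
      · have hdrop : inp.drop k = [] := List.drop_eq_nil_of_le (by omega)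
        simp [List.foldl_cons, hc, hk, ih, hdrop, pvFill]
    · simp [List.foldl_cons, hc, ih, pvFill]

theorem pvPositions_shift (ms : List Char) :
    ∀ i : Nat, pvPositions ms (i + 1) = (pvPositions ms i).map (· + 1) := by
  induction ms with
  | nil => intro i; rfl
  | cons c ms ih =>
    intro i
    by_cases hc : c = '#' <;> simp [pvPositions, hc, ih]

theorem pvFill_shift (inp : List Char) (ps : List Nat) (c : Char) :
    ∀ rest : List Char,
      ((ps.map (· + 1)).zip inp).foldl
        (fun (result : List Char) (pc : Nat × Char) => result.set pc.1 pc.2) (c :: rest)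
      = c :: (ps.zip inp).foldl
          (fun (result : List Char) (pc : Nat × Char) => result.set pc.1 pc.2) rest := by
  induction ps generalizing inp with
  | nil => intro rest; rfl
  | cons p ps ih =>
    intro rest
    cases inp with
    | nil => rfl
    | cons x xs => simp [List.zip_cons_cons, List.set, ih]

theorem pvB_fold (m inp : List Char) :
    ((pvPositions m 0).zip inp).foldl
      (fun (result : List Char) (pc : Nat × Char) => result.set pc.1 pc.2) m
    = pvFill m inp := by
  induction m generalizing inp with
  | nil => cases inp <;> rfl
  | cons c ms ih =>
    by_cases hc : c = '#'
    · cases inp with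
      | nil =>
        simp [pvPositions, hc, pvFill, pvFill_nil]
      | cons x xs =>
        have h1 : pvPositions (c :: ms) 0 = 0 :: pvPositions ms 1 := by
          simp [pvPositions, hc]
        rw [h1, List.zip_cons_cons, List.foldl_cons]
        show ((pvPositions ms (0 + 1)).zip xs).foldl _ (x :: ms) = pvFill (c :: ms) (x :: xs)
        rw [pvPositions_shift, pvFill_shift, ih]
        simp [pvFill, hc]
    · have h1 : pvPositions (c :: ms) 0 = (pvPositions ms 0).map (· + 1) := by
        simp [pvPositions, hc, pvPositions_shift ms 0]
      rw [h1, pvFill_shift, ih]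
      simp [pvFill, hc]

-- ===== VERDICT (by name: the statement is the Claim_ definition above) =====
theorem GetMaskedInput_spec : Claim_equal_GetMaskedInput := by
  intro Mask Input _
  show GetMaskedInput Mask Input = GetMaskedInput_alt Mask Input
  simp only [GetMaskedInput, GetMaskedInput_alt]
  rw [pvA_foldl Input.toList Mask.toList 0 [], pvB_fold]
  simp
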